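-- pv_equiv track=rewrite | github.com/daniel-reich/ubiquitous-fiesta | 6vSZmN66xhMRDX8YT_9.py | advanced_sort
-- ===== SOURCE A (Python) =====
-- def advanced_sort(lst):
--     l = []
--     l2 = []
--     for i in lst:
--         if i not in l:
--             l.append(i)
--     for i in l:
--         l2.append([i]*lst.count(i))
--     return l2
-- ===== SOURCE B (Python) =====
-- def advanced_sort(lst):
--     d = {}
--     for i in lst:
--         d[i] = d.get(i, []) + [i]
--     return list(d.values())
-- ===== Notes on version B (the rewrite author's own statement) =====
-- stated objective: faster
-- what changed: One pass building a value->occurrences dict (insertion-ordered) and returning its values, instead of A's two phases: a unique-collecting loop with an inner membership scan followed by a second loop calling lst.count for each unique value.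
import Mathlib
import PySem

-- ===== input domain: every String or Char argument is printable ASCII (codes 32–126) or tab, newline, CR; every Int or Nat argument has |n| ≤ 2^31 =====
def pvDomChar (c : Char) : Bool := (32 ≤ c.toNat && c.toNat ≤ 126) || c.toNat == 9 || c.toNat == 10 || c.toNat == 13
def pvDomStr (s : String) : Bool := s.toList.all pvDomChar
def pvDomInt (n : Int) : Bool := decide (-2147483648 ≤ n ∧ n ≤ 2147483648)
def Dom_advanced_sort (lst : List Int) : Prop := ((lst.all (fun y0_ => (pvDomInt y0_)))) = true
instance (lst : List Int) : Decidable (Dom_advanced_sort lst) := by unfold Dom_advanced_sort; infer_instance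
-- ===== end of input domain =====

-- B replaces A's two-phase scan (unique-collect with inner membership scan, then lst.count per unique)
-- by one dict-building pass over lst; objective: faster (O(n^2) -> O(n)).


-- ===== PORT A =====
def advanced_sort (lst : List Int) : List (List Int) :=
  let l := lst.foldl (fun l i => if i ∈ l then l else l ++ [i]) []
  l.foldl (fun l2 i => l2 ++ [List.replicate (PySem.List.count lst i) i]) []

-- ===== PORT B =====
def advanced_sort_alt (lst : List Int) : List (List Int) :=
  (lst.foldl (fun d i => d.modify i [] (fun v => v ++ [i])) (PySem.Dict.empty : PySem.Dict Int (List Int))).values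

-- ===== PRECONDITION & SPEC =====
def Spec_advanced_sort (lst : List Int) (out : List (List Int)) : Prop := out = advanced_sort_alt lst
instance (lst : List Int) (out : List (List Int)) : Decidable (Spec_advanced_sort lst out) := by unfold Spec_advanced_sort; infer_instance

-- ===== CLAIM (what is proved, stated in full; the proofs are below) =====
def Claim_equal_advanced_sort : Prop := ∀ (lst : List Int), Dom_advanced_sort lst → Spec_advanced_sort lst (advanced_sort lst)

-- ===== LEMMAS AND PROOFS =====

-- A's unique-collecting loop, generalized over the accumulator.
lemma uniqFold_eq_update (lst : List Int) (s : List Int) :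
    lst.foldl (fun l i => if i ∈ l then l else l ++ [i]) s = PySem.Set.update s lst := by
  induction lst generalizing s with
  | nil => rfl
  | cons i t ih =>
      simp only [List.foldl_cons, PySem.Set.update] at *
      rw [ih]
      by_cases h : i ∈ s <;> simp [PySem.Set.add, h]

-- A's first loop is ordered dedup (first occurrences kept).
lemma uniqFold_eq_dedup (lst : List Int) :
    lst.foldl (fun l i => if i ∈ l then l else l ++ [i]) [] = PySem.List.dedup lst := by
  rw [uniqFold_eq_update, PySem.Set.update_nil_left, PySem.List.dedup_eq_ofList]

-- B's dict after the loop, looked up at c, holds c repeated count-many times.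
lemma getD_groupFold (lst : List Int) (d : PySem.Dict Int (List Int)) (c : Int) :
    (lst.foldl (fun d i => d.modify i [] (fun v => v ++ [i])) d).getD c []
      = d.getD c [] ++ List.replicate (lst.count c) c := by
  induction lst generalizing d with
  | nil => simp
  | cons i t ih =>
      simp only [List.foldl_cons, ih, List.count_cons]
      rw [PySem.Dict.getD_modify]
      by_cases h : c = i
      · subst h; simp [List.replicate_succ, List.append_assoc]
      · simp [h, Ne.symm h]

lemma keys_groupFold (lst : List Int) :
    (lst.foldl (fun d i => d.modify i [] (fun v => v ++ [i])) (PySem.Dict.empty : PySem.Dict Int (List Int))).keys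
      = PySem.List.dedup lst := by
  rw [PySem.Dict.keys_foldl_modify lst [] (fun _ i v => v ++ [i])]
  rw [PySem.Dict.keys_empty, PySem.Set.update_nil_left, PySem.List.dedup_eq_ofList]

-- ===== VERDICT (by name: the statement is the Claim_ definition above) =====
theorem advanced_sort_spec : Claim_equal_advanced_sort := by
  intro lst _
  unfold Spec_advanced_sort advanced_sort advanced_sort_alt
  rw [PySem.Dict.values_eq_map_keys _ (by
        exact PySem.Dict.nodup_keys_foldl_modify_key lst id [] (fun _ i => (fun v => v ++ [i])) _ (by simp)) []]
  rw [keys_groupFold, uniqFold_eq_dedup, PySem.List.foldl_append_singleton_eq_map]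
  apply List.map_congr_left
  intro c _
  rw [getD_groupFold]
  simp [PySem.List.count]
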